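-- pv_equiv track=rewrite | github.com/birdman74/advent-of-code-2021 | src/day10.py | start_chunk
-- ===== SOURCE A (Python) =====
-- DELIMS = {"{": "}", "(": ")", "[": "]", "<": ">"}
--
-- def start_chunk(line: str, ch: str, chunk_start_index: int):
--     i = chunk_start_index + 1
--     complete_with_composite = ""
--     while i < len(line):
--         new_ch = line[i]
--         # end a chunk legally
--         if new_ch == DELIMS[ch]:
--             return new_ch, i, False, None
--         # start a new chunk
--         elif new_ch in DELIMS.keys():
--             chunk_end_ch, chunk_end_index, illegal, complete_with = start_chunk(line, new_ch, i)
--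
--             if complete_with is not None:
--                 complete_with_composite += complete_with
--
--             if illegal is not None and illegal:
--                 return chunk_end_ch, chunk_end_index, illegal, None
--             else:
--                 i = chunk_end_index
--         # line is illegal
--         elif new_ch in DELIMS.values():
--             return new_ch, i, True, None
--         # line runs out, calculate autocomplete for this chunk
--         else:
--             return new_ch, i, None, DELIMS[ch]
--
--         i += 1
--
--     # ran off the end of the line (there be dragons here)
--     return "", i, None, complete_with_composite + DELIMS[ch]
-- ===== SOURCE B (Python) =====
-- DELIMS = {"{": "}", "(": ")", "[": "]", "<": ">"}
--
-- def start_chunk(line, ch, chunk_start_index):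
--     # Iterative re-implementation: explicit stack of (open bracket, composite) frames
--     # instead of A's recursion; one left-to-right pass over the line.
--     stack = [(ch, "")]
--     i = chunk_start_index + 1
--     while i < len(line):
--         top, comp = stack[-1]
--         c = line[i]
--         if c == DELIMS[top]:
--             if len(stack) == 1:
--                 return c, i, False, None
--             stack.pop()
--         elif c in DELIMS:
--             stack.append((c, ""))
--         elif c in DELIMS.values():
--             return c, i, True, None
--         else:
--             if len(stack) == 1:
--                 return c, i, None, DELIMS[top]
--             stack.pop()
--             pc, pcomp = stack[-1]
--             stack[-1] = (pc, pcomp + DELIMS[top])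
--         i += 1
--     completion = ""
--     for c, comp in reversed(stack):
--         completion = comp + completion + DELIMS[c]
--     return "", i + len(stack) - 1, None, completion
-- ===== Notes on version B (the rewrite author's own statement) =====
-- stated objective: alternative
-- what changed: A's recursive-descent parser (one recursive call per nested chunk, with a while loop per frame) is replaced by a single non-recursive left-to-right pass that keeps an explicit stack of (open bracket, composite) frames and reconstructs the run-off index and completion from the final stack.
import Mathlib
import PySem

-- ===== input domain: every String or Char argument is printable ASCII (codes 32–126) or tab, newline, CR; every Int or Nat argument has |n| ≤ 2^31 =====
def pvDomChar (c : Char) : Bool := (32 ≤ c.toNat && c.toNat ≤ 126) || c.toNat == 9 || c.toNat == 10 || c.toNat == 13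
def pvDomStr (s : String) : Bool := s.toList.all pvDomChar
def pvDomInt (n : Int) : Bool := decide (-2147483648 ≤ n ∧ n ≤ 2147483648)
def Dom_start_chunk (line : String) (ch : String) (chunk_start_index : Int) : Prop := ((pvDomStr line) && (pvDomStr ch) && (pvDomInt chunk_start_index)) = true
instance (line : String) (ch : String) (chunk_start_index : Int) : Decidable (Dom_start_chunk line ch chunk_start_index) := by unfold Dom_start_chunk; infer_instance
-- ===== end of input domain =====

-- B replaces A's recursive descent by a single iterative pass holding an explicit
-- stack of (open bracket, composite) frames; equivalence of the RETURN values is proved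
-- on Pre_ (valid opening bracket ch, start index that never causes an IndexError).

-- DELIMS[s] (some = the closing bracket of key s; none = KeyError)
def delimsGet? (s : String) : Option String :=
  if s = "{" then some "}"
  else if s = "(" then some ")"
  else if s = "[" then some "]"
  else if s = "<" then some ">"
  else none

-- `s in DELIMS.values()`
def isCloserStr (s : String) : Bool :=
  s = "}" || s = ")" || s = "]" || s = ">"

-- ===== PORT A =====
-- A's recursion+while loop; `none` models a raised exception (KeyError/IndexError)
-- or exhausted fuel (the fuel supplied at top level is always sufficient).
def goA (cs : List Char) (n : Int) (ch : String) (i : Int) (comp : String) :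
    Nat → Option (String × Int × Option Bool × Option String)
  | 0 => none
  | fuel + 1 =>
    match delimsGet? ch with
    | none => none
    | some close =>
      if i < n then
        match PySem.List.pyGet? cs i with
        | none => none
        | some c =>
          let nc := String.mk [c]
          if nc = close then some (nc, i, some false, none)
          else if (delimsGet? nc).isSome then
            match goA cs n nc (i + 1) "" fuel with
            | none => none
            | some (ce, cj, ill, cw) =>
              let comp' := comp ++ cw.getD ""
              if ill = some true then some (ce, cj, ill, none)
              else goA cs n ch (cj + 1) comp' fuel
          else if isCloserStr nc then some (nc, i, some true, none)
          else some (nc, i, none, some close)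
      else some ("", i, none, some (comp ++ close))

def start_chunk (line : String) (ch : String) (chunk_start_index : Int) : String × Int × Option Bool × Option String :=
  let cs := line.toList
  ((goA cs (cs.length : Int) ch (chunk_start_index + 1) "" (4 * cs.length + 8)).getD ("", 0, none, none))

-- ===== PORT B =====
-- the final completion: fold over the stack top-first, comp + acc + DELIMS[c]
def totalComp (frames : List (String × String)) : Option String :=
  frames.foldlM (fun acc pr => (delimsGet? pr.1).map (fun cl => pr.2 ++ acc ++ cl)) ""

-- B's single loop; the stack is (top, rest), rest ordered top-of-stack first below top.
def goB (cs : List Char) (n : Int) (i : Int) (top : String × String) (rest : List (String × String)) :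
    Nat → Option (String × Int × Option Bool × Option String)
  | 0 => none
  | g + 1 =>
    match delimsGet? top.1 with
    | none => none
    | some close =>
      if i < n then
        match PySem.List.pyGet? cs i with
        | none => none
        | some c =>
          let nc := String.mk [c]
          if nc = close then
            match rest with
            | [] => some (nc, i, some false, none)
            | p :: ps => goB cs n (i + 1) p ps g
          else if (delimsGet? nc).isSome then
            goB cs n (i + 1) (nc, "") (top :: rest) g
          else if isCloserStr nc then some (nc, i, some true, none)
          else
            match rest with
            | [] => some (nc, i, none, some close)
            | p :: ps => goB cs n (i + 1) (p.1, p.2 ++ close) ps g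
      else
        match totalComp (top :: rest) with
        | none => none
        | some t => some ("", i + (rest.length : Int), none, some t)

def start_chunk_alt (line : String) (ch : String) (chunk_start_index : Int) : String × Int × Option Bool × Option String :=
  let cs := line.toList
  ((goB cs (cs.length : Int) (chunk_start_index + 1) (ch, "") [] (4 * cs.length + 8)).getD ("", 0, none, none))

-- ===== PRECONDITION & SPEC =====
-- Pre_ admits exactly the inputs where the Python A returns normally: ch must be an
-- opening bracket (else KeyError) and the start index must not reach below -len(line)
-- (else IndexError from Python's negative indexing).
def Pre_start_chunk (line : String) (ch : String) (chunk_start_index : Int) : Prop :=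
  (ch = "{" ∨ ch = "(" ∨ ch = "[" ∨ ch = "<") ∧
  -(line.toList.length : Int) ≤ chunk_start_index + 1
instance (line : String) (ch : String) (chunk_start_index : Int) : Decidable (Pre_start_chunk line ch chunk_start_index) := by unfold Pre_start_chunk; infer_instance

def pvWitness_start_chunk : String × String × Int := ("[<>]", "[", 0)

def Spec_start_chunk (line : String) (ch : String) (chunk_start_index : Int) (out : String × Int × Option Bool × Option String) : Prop := out = start_chunk_alt line ch chunk_start_index
instance (line : String) (ch : String) (chunk_start_index : Int) (out : String × Int × Option Bool × Option String) : Decidable (Spec_start_chunk line ch chunk_start_index out) := by unfold Spec_start_chunk; infer_instance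

-- ===== CLAIM (what is proved, stated in full; the proofs are below) =====
def Claim_equal_start_chunk : Prop := ∀ (line : String) (ch : String) (chunk_start_index : Int), Dom_start_chunk line ch chunk_start_index → Pre_start_chunk line ch chunk_start_index → Spec_start_chunk line ch chunk_start_index (start_chunk line ch chunk_start_index)

-- ===== LEMMAS AND PROOFS =====

-- shape: an illegal result of A carries no completion
theorem goA_illegal_none (cs : List Char) (n : Int) :
    ∀ fuel ch i comp r, goA cs n ch i comp fuel = some r →
      r.2.2.1 = some true → r.2.2.2 = none := by
  intro fuel
  induction fuel with
  | zero => intro ch i comp r h; simp [goA] at h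
  | succ fuel ih =>
    intro ch i comp r h htrue
    rw [goA] at h
    rcases hd : delimsGet? ch with _ | close <;> simp only [hd] at h
    · simp at h
    · split at h
      · rcases hg : PySem.List.pyGet? cs i with _ | c <;> simp only [hg] at h
        · simp at h
        · split at h
          · cases h; simp_all
          · split at h
            · rcases hc : goA cs n (String.mk [c]) (i + 1) "" fuel with _ | r' <;>
                simp only [hc] at h
              · simp at h
              · obtain ⟨ce, cj, ill, cw⟩ := r'
                simp only at h
                split at h
                · cases h; rfl
                · exact ih _ _ _ _ h htrue
            · split at h
              · cases h; rfl
              · cases h; simp_all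
      · cases h; simp_all

-- fuel sufficiency for A (with the index lower bound on the result)
theorem goA_suff (cs : List Char) :
    ∀ fuel (ch : String) (i : Int) (comp : String),
      (delimsGet? ch).isSome → -(cs.length : Int) ≤ i →
      2 * ((cs.length : Int) - i).toNat + 2 ≤ fuel →
      ∃ r, goA cs (cs.length : Int) ch i comp fuel = some r ∧ i ≤ r.2.1 := by
  intro fuel
  induction fuel with
  | zero => intro ch i comp _ _ hf; omega
  | succ fuel ih =>
    intro ch i comp hch hi hf
    rcases hd : delimsGet? ch with _ | close
    · rw [hd] at hch; simp at hch
    · by_cases hlt : i < (cs.length : Int)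
      · rcases hg : PySem.List.pyGet? cs i with _ | c
        · rw [PySem.List.pyGet?_eq_none_iff] at hg
          exact absurd (by constructor <;> omega : PySem.Raise.InRange cs.length i) hg
        · by_cases h1 : String.mk [c] = close
          · exact ⟨(String.mk [c], i, some false, none),
              by rw [goA, hd]; simp [hlt, hg, h1], le_refl i⟩
          · by_cases h2 : (delimsGet? (String.mk [c])).isSome
            · obtain ⟨rc, hrc, hrci⟩ := ih (String.mk [c]) (i + 1) "" h2 (by omega) (by omega)
              obtain ⟨ce, cj, ill, cw⟩ := rc
              simp only at hrci
              by_cases hill : ill = some true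
              · subst hill
                refine ⟨(ce, cj, some true, none), ?_, by simp; omega⟩
                rw [goA, hd]; simp [hlt, hg, h1, h2, hrc]
              · obtain ⟨r2, hr2, hr2i⟩ := ih ch (cj + 1) (comp ++ cw.getD "") hch (by omega) (by omega)
                refine ⟨r2, ?_, by omega⟩
                rw [goA, hd]; simp [hlt, hg, h1, h2, hrc, hill, hr2]
            · by_cases h3 : isCloserStr (String.mk [c]) = true
              · exact ⟨(String.mk [c], i, some true, none),
                  by rw [goA, hd]; simp [hlt, hg, h1, h2, h3], le_refl i⟩
              · exact ⟨(String.mk [c], i, none, some close),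
                  by rw [goA, hd]; simp [hlt, hg, h1, h2, h3], le_refl i⟩
      · exact ⟨("", i, none, some (comp ++ close)),
          by rw [goA, hd]; simp [hlt], le_refl i⟩

-- totalComp is some on a stack of valid frames
theorem totalComp_some :
    ∀ (frames : List (String × String)) (acc : String),
      (∀ p ∈ frames, (delimsGet? p.1).isSome) →
      ∃ t, frames.foldlM (fun acc pr => (delimsGet? pr.1).map (fun cl => pr.2 ++ acc ++ cl)) acc = some t := by
  intro frames
  induction frames with
  | nil => exact fun acc _ => ⟨acc, rfl⟩
  | cons p ps ih =>
    intro acc hv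
    rcases hd : delimsGet? p.1 with _ | cl
    · have := hv p (by simp); rw [hd] at this; simp at this
    · obtain ⟨t, ht⟩ := ih (p.2 ++ acc ++ cl) (fun q hq => hv q (by simp [hq]))
      exact ⟨t, by simp [List.foldlM, hd]; exact ht⟩

-- fuel sufficiency for B
theorem goB_suff (cs : List Char) :
    ∀ g (i : Int) (top : String × String) (rest : List (String × String)),
      (delimsGet? top.1).isSome → (∀ p ∈ rest, (delimsGet? p.1).isSome) →
      -(cs.length : Int) ≤ i →
      ((cs.length : Int) - i).toNat + 1 ≤ g →
      ∃ s, goB cs (cs.length : Int) i top rest g = some s := by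
  intro g
  induction g with
  | zero => intro i top rest _ _ _ hg; omega
  | succ g ih =>
    intro i top rest htop hrest hi hg
    rcases hd : delimsGet? top.1 with _ | close
    · rw [hd] at htop; simp at htop
    · by_cases hlt : i < (cs.length : Int)
      · rcases hgc : PySem.List.pyGet? cs i with _ | c
        · rw [PySem.List.pyGet?_eq_none_iff] at hgc
          exact absurd (by constructor <;> omega : PySem.Raise.InRange cs.length i) hgc
        · by_cases h1 : String.mk [c] = close
          · rcases rest with _ | ⟨p, ps⟩
            · exact ⟨(close, i, some false, none), by rw [goB, hd]; simp [hlt, hgc, h1]⟩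
            · obtain ⟨s, hs⟩ := ih (i+1) p ps (hrest p (by simp)) (fun q hq => hrest q (by simp [hq])) (by omega) (by omega)
              exact ⟨s, by rw [goB, hd]; simp [hlt, hgc, h1, hs]⟩
          · by_cases h2 : (delimsGet? (String.mk [c])).isSome
            · obtain ⟨s, hs⟩ := ih (i+1) (String.mk [c], "") (top :: rest) h2
                (by intro q hq; simp only [List.mem_cons] at hq; rcases hq with hq | hq; exacts [by simp [hq, hd], hrest q hq])
                (by omega) (by omega)
              exact ⟨s, by rw [goB, hd]; simp [hlt, hgc, h1, h2, hs]⟩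
            · by_cases h3 : isCloserStr (String.mk [c]) = true
              · exact ⟨(String.mk [c], i, some true, none), by rw [goB, hd]; simp [hlt, hgc, h1, h2, h3]⟩
              · rcases rest with _ | ⟨p, ps⟩
                · exact ⟨(String.mk [c], i, none, some close), by rw [goB, hd]; simp [hlt, hgc, h1, h2, h3]⟩
                · obtain ⟨s, hs⟩ := ih (i+1) (p.1, p.2 ++ close) ps
                    (hrest p (by simp)) (fun q hq => hrest q (by simp [hq])) (by omega) (by omega)
                  exact ⟨s, by rw [goB, hd]; simp [hlt, hgc, h1, h2, h3, hs]⟩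
      · obtain ⟨t, ht⟩ := totalComp_some (top :: rest) ""
          (by intro q hq; simp only [List.mem_cons] at hq; rcases hq with hq | hq; exacts [by simp [hq, hd], hrest q hq])
        exact ⟨("", i + (rest.length : Int), none, some t), by rw [goB, hd]; simp [hlt, totalComp, ht]⟩


-- the simulation relation: what the whole B run must produce, given A's result for the top frame
def SimRel (cs : List Char) (n : Int) (g : Nat) (r : String × Int × Option Bool × Option String)
    (rest : List (String × String)) (s : String × Int × Option Bool × Option String) : Prop :=
  match rest with
  | [] => s = r
  | p :: ps =>
      if r.2.2.1 = some true then s = r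
      else ∃ g', g' ≤ g ∧ goB cs n (r.2.1 + 1) (p.1, p.2 ++ r.2.2.2.getD "") ps g' = some s

-- SimRel is monotone in the fuel bound
theorem SimRel_mono (cs : List Char) (n : Int) (g1 g2 : Nat)
    (r s : String × Int × Option Bool × Option String) (rest : List (String × String))
    (h : SimRel cs n g1 r rest s) (hle : g1 ≤ g2) : SimRel cs n g2 r rest s := by
  cases rest with
  | nil => exact h
  | cons p ps =>
    simp only [SimRel] at h ⊢
    by_cases ht : r.2.2.1 = some true
    · rwa [if_pos ht] at h ⊢
    · rw [if_neg ht] at h ⊢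
      obtain ⟨g', hg', hrun⟩ := h
      exact ⟨g', le_trans hg' hle, hrun⟩

-- main simulation lemma: B's stack run refines A's recursion
theorem goB_sim (cs : List Char) (n : Int) :
    ∀ g i ch comp rest fA r s,
      goA cs n ch i comp fA = some r →
      goB cs n i (ch, comp) rest g = some s →
      SimRel cs n g r rest s := by
  intro g
  induction g using Nat.strong_induction_on with
  | _ g IH =>
    intro i ch comp rest fA r s hA hB
    rcases fA with _ | f
    · simp [goA] at hA
    rcases g with _ | g0
    · simp [goB] at hB
    rw [goA] at hA
    rw [goB] at hB
    rcases hd : delimsGet? ch with _ | close <;> simp only [hd] at hA hB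
    · simp at hA
    by_cases hlt : i < n
    · rw [if_pos hlt] at hA hB
      rcases hg : PySem.List.pyGet? cs i with _ | c <;> simp only [hg] at hA hB
      · simp at hA
      by_cases h1 : String.mk [c] = close
      · rw [if_pos h1] at hA hB
        cases hA
        cases rest with
        | nil =>
          cases hB
          simp [SimRel]
        | cons p ps =>
          simp only [SimRel, if_neg (by simp : ¬ (some false = some true))]
          exact ⟨g0, by omega, by simpa using hB⟩
      · rw [if_neg h1] at hA hB
        by_cases h2 : (delimsGet? (String.mk [c])).isSome
        · rw [if_pos h2] at hA hB
          rcases hc : goA cs n (String.mk [c]) (i + 1) "" f with _ | rc <;>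
            simp only [hc] at hA
          · simp at hA
          obtain ⟨ce, cj, ill, cw⟩ := rc
          simp only at hA
          have hrel := IH g0 (by omega) (i + 1) (String.mk [c]) "" ((ch, comp) :: rest)
            f (ce, cj, ill, cw) s hc hB
          simp only [SimRel] at hrel
          by_cases hill : ill = some true
          · rw [if_pos hill] at hA
            cases hA
            have hcw : cw = none := goA_illegal_none cs n f _ _ _ _ hc (by simpa using hill)
            subst hcw hill
            subst hrel
            cases rest with
            | nil => simp [SimRel]
            | cons p ps => simp [SimRel]
          · rw [if_neg hill] at hA
            rw [if_neg (by simpa using hill)] at hrel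
            obtain ⟨g', hg', hrun⟩ := hrel
            have := IH g' (by omega) (cj + 1) ch (comp ++ cw.getD "") rest f r s hA hrun
            exact SimRel_mono cs n g' (g0 + 1) r s rest this (by omega)
        · rw [if_neg h2] at hA hB
          by_cases h3 : isCloserStr (String.mk [c]) = true
          · rw [if_pos h3] at hA hB
            cases hA
            cases hB
            cases rest with
            | nil => simp [SimRel]
            | cons p ps => simp [SimRel]
          · rw [if_neg h3] at hA hB
            cases hA
            cases rest with
            | nil =>
              cases hB
              simp [SimRel]
            | cons p ps =>
              simp only [SimRel, if_neg (by simp : ¬ (none = some true))]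
              exact ⟨g0, by omega, by simpa using hB⟩
    · rw [if_neg hlt] at hA hB
      cases hA
      rcases htc : totalComp ((ch, comp) :: rest) with _ | t <;> simp only [htc] at hB
      · simp at hB
      cases hB
      cases rest with
      | nil =>
        simp [totalComp, List.foldlM, hd] at htc
        simp [SimRel, ← htc]
      | cons p ps =>
        simp only [SimRel, if_neg (by simp : ¬ (none = some true))]
        rcases hdp : delimsGet? p.1 with _ | clp
        · simp [totalComp, List.foldlM, hd, hdp] at htc
        refine ⟨g0 + 1, le_refl _, ?_⟩
        rw [goB]
        simp only [hdp]
        rw [if_neg (by omega : ¬ i + 1 < n)]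
        have htc' : totalComp ((p.1, p.2 ++ (comp ++ close)) :: ps) = some t := by
          simp [totalComp, List.foldlM, hd, hdp] at htc ⊢
          exact htc
        simp only [Option.getD_some, htc']
        have hidx : i + 1 + (ps.length : Int) = i + ((p :: ps).length : Int) := by
          simp only [List.length_cons]; push_cast; omega
        rw [hidx]
-- ===== VERDICT (by name: the statement is the Claim_ definition above) =====
theorem start_chunk_spec : Claim_equal_start_chunk := by
  intro line ch k _ hpre
  obtain ⟨hch, hk⟩ := hpre
  have hvalid : (delimsGet? ch).isSome := by
    rcases hch with h | h | h | h <;> simp [h, delimsGet?]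
  obtain ⟨r, hr, _⟩ := goA_suff line.toList (4 * line.toList.length + 8) ch (k + 1) ""
    hvalid hk (by omega)
  obtain ⟨s, hs⟩ := goB_suff line.toList (4 * line.toList.length + 8) (k + 1) (ch, "") []
    hvalid (by simp) hk (by omega)
  have := goB_sim line.toList (line.toList.length : Int) _ _ _ _ _ _ _ _ hr hs
  simp only [SimRel] at this
  unfold Spec_start_chunk start_chunk start_chunk_alt
  simp only [hr, hs, Option.getD_some, this]
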